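-- pv_equiv track=rewrite | github.com/toniale/DSC20 | homeworks/hw02.py | even_old_ops
-- ===== SOURCE A (Python) =====
-- def even_old_ops(string):
--     """
--     Depending on the indices (odd or even), this function will perform
--     different operations on the characters and return it as a string. If at
--     even indices, the characters will be reversed. If at odd indices, the
--     function will change an uppercase letter to lowercase and vice versa.
--     Otherwise, if at an odd index and the character is not a letter, it will
--     be replaced with a dot, (“.”).  An empty string will be returned if the
--     input is empty.
--
--     >>> even_old_ops("Rand0mStr1NG")
--     'NArDSM0Tn.Rg'
--     >>> even_old_ops("d_s_c__20")
--     '0._.c.s.d'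
--     >>> even_old_ops("0U1U2l3l4?5?6")
--     '6u5u4L3L2.1.0'
--     >>> even_old_ops('<3frufts<3')
--     '<.tRuFfS<.'
--     >>> even_old_ops('3m pl3h')
--     'hMlP .3'
--     >>> (even_old_ops('__w__  '))
--     ' ._.w._'
--     """
--     new_string = ''
--     divisor = 2
--     # skips a character in a string and reveres it:
--     reversing = string[::2][::-1]
--     # checking for odd or even positions in our string
--     for index, character in enumerate(string):
--         # Case 1: if in an even position, reverse them by the index // divisor
--         # because divisor = 2, so we're reversing the character at even indices
--         if index % 2 == 0:
--             new_string = new_string + reversing[index//divisor]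
--         # Case 2: if a character is at an odd indice:
--         # we change uppercase to lowercase and vice versa
--         # every non-letter will be replaced with a "."
--         elif index % 2 != 0: # odd --> lower & upper
--             if character.isupper() is True:
--                 new_string = new_string + character.lower()
--             elif character.islower() is True:
--                 new_string = new_string + character.upper()
--             else:
--                 new_string = new_string + character.replace(character, '.')
--     return new_string
-- ===== SOURCE B (Python) =====
-- def _swap(c):
--     if c.isupper():
--         return c.lower()
--     if c.islower():
--         return c.upper()
--     return '.'
--
--
-- def even_old_ops(string):
--     # Two slice-derived passes plus a merge, instead of one parity loop.
--     evens = list(string[::2])[::-1]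
--     odds = [_swap(c) for c in string[1::2]]
--     merged = [e + o for e, o in zip(evens, odds)]
--     merged.extend(evens[len(odds):])
--     return ''.join(merged)
-- ===== Notes on version B (the rewrite author's own statement) =====
-- stated objective: alternative
-- what changed: Replaces A's single enumerate loop that switches on index parity (indexing into a precomputed reversed slice) by two independent slice-derived passes - the reversed even-index characters and the case-swapped odd-index characters - merged with zip plus the leftover even character.
import Mathlib
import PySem

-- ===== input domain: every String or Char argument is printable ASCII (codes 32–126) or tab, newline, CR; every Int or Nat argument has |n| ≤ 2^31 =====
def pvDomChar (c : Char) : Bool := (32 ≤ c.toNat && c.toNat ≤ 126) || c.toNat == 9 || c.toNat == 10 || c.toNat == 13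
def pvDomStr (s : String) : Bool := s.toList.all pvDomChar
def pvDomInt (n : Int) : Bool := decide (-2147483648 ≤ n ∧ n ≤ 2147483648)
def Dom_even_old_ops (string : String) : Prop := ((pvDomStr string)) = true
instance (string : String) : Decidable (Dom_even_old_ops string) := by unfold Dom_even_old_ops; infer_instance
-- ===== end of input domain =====

-- B replaces A's single parity-switching enumerate loop by two slice-derived passes
-- (reversed even-index chars; case-swapped odd-index chars) merged by zip; objective: alternative decomposition.

-- ===== PORT A =====
def even_old_ops (string : String) : String :=
  let s := string.toList
  -- reversing = string[::2][::-1]; both slice steps are nonzero, so slice? is always `some`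
  let reversing := (PySem.List.slice? ((PySem.List.slice? s none none 2).getD []) none none (-1)).getD []
  let new := (PySem.List.enumerate s 0).foldl (fun new ic =>
    if PySem.Int.mod ic.1 2 == 0 then
      -- reversing[index//2]; index//2 is always in range, so the IndexError case (none) is unreachable
      new ++ (PySem.List.pyGet? reversing (PySem.Int.floordiv ic.1 2)).toList
    else if ¬ (PySem.Int.mod ic.1 2 == 0) then
      if PySem.Chars.isupper ic.2 then new ++ [PySem.Chars.lowerChar ic.2]
      else if PySem.Chars.islower ic.2 then new ++ [PySem.Chars.upperChar ic.2]
      else new ++ ['.']   -- character.replace(character, '.') on a one-char string is "."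
    else new) []
  String.ofList new

-- ===== PORT B =====
def swapChar (c : Char) : Char :=
  if PySem.Chars.isupper c then PySem.Chars.lowerChar c
  else if PySem.Chars.islower c then PySem.Chars.upperChar c
  else '.'

def even_old_ops_alt (string : String) : String :=
  let s := string.toList
  -- evens = list(string[::2])[::-1]; odds = [_swap(c) for c in string[1::2]]  (slice steps nonzero → always `some`)
  let evens := (PySem.List.slice? ((PySem.List.slice? s none none 2).getD []) none none (-1)).getD []
  let odds := ((PySem.List.slice? s (some 1) none 2).getD []).map swapChar
  let merged := (evens.zip odds).map (fun p => [p.1, p.2])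
  String.ofList (merged.flatten ++ evens.drop odds.length)

-- ===== PRECONDITION & SPEC =====
def Spec_even_old_ops (string : String) (out : String) : Prop := out = even_old_ops_alt string
instance (string : String) (out : String) : Decidable (Spec_even_old_ops string out) := by unfold Spec_even_old_ops; infer_instance

-- ===== CLAIM (what is proved, stated in full; the proofs are below) =====
def Claim_equal_even_old_ops : Prop := ∀ (string : String), Dom_even_old_ops string → Spec_even_old_ops string (even_old_ops string)

-- ===== LEMMAS AND PROOFS =====

/-- Even-index elements of a list (Python's `xs[::2]`). -/
def everyOther {α : Type} : List α → List α
  | [] => []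
  | [a] => [a]
  | a :: _ :: t => a :: everyOther t

lemma everyOther_cons_tail {α : Type} (b : α) (t : List α) :
    everyOther (b :: t) = b :: everyOther t.tail := by
  cases t
  · simp [everyOther]
  · simp [everyOther]

lemma length_everyOther {α : Type} (xs : List α) :
    (everyOther xs).length = (xs.length + 1) / 2 := by
  induction xs using everyOther.induct <;> simp [everyOther, *] <;> omega

lemma fm_even {α : Type} (xs : List α) :
    (List.range ((xs.length + 1) / 2)).filterMap (fun k => xs[2 * k]?) = everyOther xs := by
  induction xs using everyOther.induct with
  | case1 => simp [everyOther]
  | case2 a => simp [everyOther]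
  | case3 a b t ih =>
      have hc : ((a :: b :: t).length + 1) / 2 = (t.length + 1) / 2 + 1 := by simp; omega
      rw [hc, List.range_succ_eq_map, List.filterMap_cons, List.filterMap_map]
      simp only [Function.comp]
      have hf : (fun k => (a :: b :: t)[2 * Nat.succ k]?) = fun k => t[2 * k]? := by
        funext k
        have : 2 * Nat.succ k = 2 * k + 1 + 1 := by omega
        simp [this]
      rw [hf, ih]
      simp [everyOther]

lemma slice_step2 {α : Type} (xs : List α) :
    PySem.List.slice? xs none none 2 = some (everyOther xs) := by
  have hfun : (fun k : Nat => xs[((2:Int) * (k:Int)).toNat]?) = fun k => xs[2 * k]? := by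
    funext k; congr 1
  have hc : (if 0 < xs.length then (((xs.length : Int) + 2 - 1) / 2).toNat else 0)
      = (xs.length + 1) / 2 := by split_ifs <;> omega
  simp only [PySem.List.slice?, PySem.List.sliceIndices]
  norm_num
  rw [hc, hfun, fm_even]

lemma slice_odd_step2 {α : Type} (xs : List α) :
    PySem.List.slice? xs (some 1) none 2 = some (everyOther xs.tail) := by
  cases xs with
  | nil => simp [PySem.List.slice?, PySem.List.sliceIndices, everyOther]
  | cons x t =>
      have hfun : (fun k : Nat => (x :: t)[((1:Int) + 2 * (k:Int)).toNat]?) = fun k => t[2 * k]? := by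
        funext k
        have : ((1:Int) + 2 * (k:Int)).toNat = 2 * k + 1 := by omega
        simp [this]
      have hc : (if 0 < t.length then (((t.length : Int) + 2 - 1) / 2).toNat else 0)
          = (t.length + 1) / 2 := by split_ifs <;> omega
      simp only [PySem.List.slice?, PySem.List.sliceIndices]
      norm_num
      rw [hc, hfun, fm_even]

/-- The body of A's loop as a pure list-piece function. -/
def pieceA (rev : List Char) (ic : Int × Char) : List Char :=
  if PySem.Int.mod ic.1 2 == 0 then
    (PySem.List.pyGet? rev (PySem.Int.floordiv ic.1 2)).toList
  else if ¬ (PySem.Int.mod ic.1 2 == 0) then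
    if PySem.Chars.isupper ic.2 then [PySem.Chars.lowerChar ic.2]
    else if PySem.Chars.islower ic.2 then [PySem.Chars.upperChar ic.2]
    else ['.']
  else []

/-- A's output described structurally: consume the input two chars at a time,
    the even slot read from `rev` at position `m`, the odd slot case-swapped. -/
def goA (rev : List Char) : Nat → List Char → List Char
  | _, [] => []
  | m, [_] => (PySem.List.pyGet? rev (m : Int)).toList
  | m, _ :: b :: t => (PySem.List.pyGet? rev (m : Int)).toList ++ [swapChar b] ++ goA rev (m + 1) t

/-- B's merge step as a function. -/
def mergeB (evens odds : List Char) : List Char :=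
  ((evens.zip odds).map (fun p => [p.1, p.2])).flatten ++ evens.drop odds.length

lemma mergeB_cons (e : Char) (es : List Char) (o : Char) (os : List Char) :
    mergeB (e :: es) (o :: os) = e :: o :: mergeB es os := by
  simp [mergeB]

lemma fmod_two_mul (m : Int) : (2 * m).fmod 2 = 0 := by rw [Int.fmod_eq_emod]; omega
lemma fmod_two_mul_add_one (m : Int) : (2 * m + 1).fmod 2 = 1 := by rw [Int.fmod_eq_emod]; omega
lemma fdiv_two_mul (m : Int) : (2 * m).fdiv 2 = m := by rw [Int.fdiv_eq_ediv]; omega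
lemma fdiv_two_mul_add_one (m : Int) : (2 * m + 1).fdiv 2 = m := by rw [Int.fdiv_eq_ediv]; omega

lemma flatMap_pieceA (rev : List Char) :
    ∀ (s : List Char) (m : Nat),
      (PySem.List.enumerate s (2 * (m : Int))).flatMap (pieceA rev) = goA rev m s
  | [], m => by simp [PySem.List.enumerate, goA]
  | [a], m => by
      simp [PySem.List.enumerate, goA, pieceA, PySem.Int.mod, PySem.Int.floordiv]
  | a :: b :: t, m => by
      rw [PySem.List.enumerate_cons, PySem.List.enumerate_cons]
      have h2 : 2 * (m : Int) + 1 + 1 = 2 * ((m + 1 : Nat) : Int) := by push_cast; ring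
      rw [h2, List.flatMap_cons, List.flatMap_cons, flatMap_pieceA rev t (m + 1)]
      simp only [goA, pieceA, swapChar, PySem.Int.mod, PySem.Int.floordiv,
        fmod_two_mul, fmod_two_mul_add_one, fdiv_two_mul, fdiv_two_mul_add_one]
      norm_num
      split_ifs <;> simp

lemma goA_eq_mergeB :
    ∀ (s : List Char) (m : Nat) (rev : List Char), rev.length = m + (s.length + 1) / 2 →
      goA rev m s = mergeB (rev.drop m) ((everyOther s.tail).map swapChar)
  | [], m, rev, h => by
      have : rev.drop m = [] := by
        apply List.drop_eq_nil_of_le; simp only [List.length_nil] at h; omega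
      simp [goA, mergeB, everyOther, this]
  | [a], m, rev, h => by
      have hm : m < rev.length := by simp only [List.length_singleton] at h; omega
      have hd : rev.drop m = rev[m] :: rev.drop (m + 1) := List.drop_eq_getElem_cons hm
      have hd2 : rev.drop (m + 1) = [] := by
        apply List.drop_eq_nil_of_le; simp only [List.length_singleton] at h; omega
      simp [goA, mergeB, everyOther, PySem.List.pyGet?_natCast, hd, hd2,
        List.getElem?_eq_getElem hm]
  | a :: b :: t, m, rev, h => by
      have hm : m < rev.length := by simp only [List.length_cons] at h; omega
      have hd : rev.drop m = rev[m] :: rev.drop (m + 1) := List.drop_eq_getElem_cons hm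
      have hrec := goA_eq_mergeB t (m + 1) rev (by simp only [List.length_cons] at h ⊢; omega)
      have htail : everyOther (b :: t) = b :: everyOther t.tail := everyOther_cons_tail b t
      simp only [goA, hrec, List.tail_cons, htail, List.map_cons, hd, mergeB_cons,
        PySem.List.pyGet?_natCast, List.getElem?_eq_getElem hm, Option.toList_some]
      simp

theorem even_old_ops_spec : Claim_equal_even_old_ops := by
  intro string _
  unfold Spec_even_old_ops even_old_ops even_old_ops_alt
  simp only [slice_step2, slice_odd_step2, Option.getD_some,
    PySem.List.slice?_none_none_neg_one]
  set s := string.toList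
  set rev := (everyOther s).reverse with hrev
  have hbody : (fun (new : List Char) (ic : Int × Char) =>
      if PySem.Int.mod ic.1 2 == 0 then
        new ++ (PySem.List.pyGet? rev (PySem.Int.floordiv ic.1 2)).toList
      else if ¬ (PySem.Int.mod ic.1 2 == 0) then
        if PySem.Chars.isupper ic.2 then new ++ [PySem.Chars.lowerChar ic.2]
        else if PySem.Chars.islower ic.2 then new ++ [PySem.Chars.upperChar ic.2]
        else new ++ ['.']
      else new) = fun new ic => new ++ pieceA rev ic := by
    funext new ic
    simp only [pieceA]
    split_ifs <;> simp
  rw [hbody, PySem.List.foldl_append_eq_flatMap]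
  have h0 : (0 : Int) = 2 * ((0 : Nat) : Int) := by norm_num
  rw [h0, flatMap_pieceA rev s 0,
    goA_eq_mergeB s 0 rev (by simp [hrev, length_everyOther])]
  simp [mergeB]
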